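-- pv_equiv track=rewrite | github.com/Nghia03092004/nghia03092004.github.io | project_euler/problem_608/solution.py | sigma
-- ===== SOURCE A (Python) =====
-- def sigma(n, k=1):
--     """Sum of k-th powers of divisors of n."""
--     total = 0
--     for d in range(1, int(n**0.5) + 1):
--         if n % d == 0:
--             total += d**k
--             if d != n // d:
--                 total += (n // d)**k
--     return total
-- ===== SOURCE B (Python) =====
-- def sigma(n, k=1):
--     """Sum of k-th powers of divisors of n, computed from the prime factorisation:
--     sigma_k is multiplicative and sigma_k(p**a) = 1 + p**k + ... + p**(a*k)."""
--     if n == 0: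
--         return 0
--     total = 1
--     rem = n
--     p = 2
--     while p * p <= rem:
--         if rem % p == 0:
--             term = 1
--             exp_sum = 1
--             while rem % p == 0:
--                 rem //= p
--                 term *= p ** k
--                 exp_sum += term
--             total *= exp_sum
--         p += 1
--     if rem > 1:
--         total *= 1 + rem ** k
--     return total
-- ===== Notes on version B (the rewrite author's own statement) =====
-- stated objective: alternative
-- what changed: B factorises n by trial division and multiplies per-prime geometric sums 1 + p**k + ... + p**(a*k) (sigma_k is multiplicative), instead of A's sqrt(n) loop that pairs each small divisor d with n//d.
-- outside the precondition, e.g. on sigma(2, -1): A returns 1.5, B returns 1.5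
import Mathlib
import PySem

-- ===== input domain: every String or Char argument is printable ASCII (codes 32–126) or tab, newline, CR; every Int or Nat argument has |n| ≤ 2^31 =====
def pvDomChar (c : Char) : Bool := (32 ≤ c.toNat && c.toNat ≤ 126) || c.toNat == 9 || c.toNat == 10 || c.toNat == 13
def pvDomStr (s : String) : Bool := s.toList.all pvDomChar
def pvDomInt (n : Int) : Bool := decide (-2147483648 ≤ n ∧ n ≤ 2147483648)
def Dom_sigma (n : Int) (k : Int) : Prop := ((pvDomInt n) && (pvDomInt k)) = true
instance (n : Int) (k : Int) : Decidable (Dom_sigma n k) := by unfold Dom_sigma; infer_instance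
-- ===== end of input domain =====

-- B computes the divisor-power sum from the prime factorisation (σ_k is multiplicative:
-- per prime a geometric sum 1+p^k+…+p^(a·k)) instead of A's √n paired-divisor scan.

-- ===== PORT A =====
-- int(n**0.5) is ported as Nat.sqrt n.toNat: exact for 0 ≤ n ≤ 2^31 (the float sqrt of an exactly
-- representable double in this range is correctly rounded and cannot cross an integer boundary);
-- d**k is ported as d ^ k.toNat, exact for 0 ≤ k (Pre_ excludes negative k with n ≠ 0, where
-- Python returns a float).
def sigma (n : Int) (k : Int) : Int :=
  (PySem.List.pyRange 1 ((Nat.sqrt n.toNat : Int) + 1) 1).foldl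
    (fun total d =>
      if PySem.Int.mod n d = 0 then
        let t := total + d ^ k.toNat
        if d ≠ PySem.Int.floordiv n d then t + (PySem.Int.floordiv n d) ^ k.toNat else t
      else total) 0

-- ===== PORT B =====
-- trial-division factorisation: the fuel arguments only bound the while-loops (n.toNat+2 outer
-- steps / rem.toNat inner steps always suffice, proved in outer_spec/inner_spec below)
def sigmaAltInner (fuel : Nat) (k p rem term expSum : Int) : Int × Int × Int :=
  match fuel with
  | 0 => (rem, term, expSum)
  | f+1 =>
    if PySem.Int.mod rem p = 0 then
      let rem' := PySem.Int.floordiv rem p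
      let term' := term * p ^ k.toNat
      sigmaAltInner f k p rem' term' (expSum + term')
    else (rem, term, expSum)

def sigmaAltLoop (fuel : Nat) (k p rem total : Int) : Int × Int :=
  match fuel with
  | 0 => (rem, total)
  | f+1 =>
    if p * p ≤ rem then
      if PySem.Int.mod rem p = 0 then
        match sigmaAltInner rem.toNat k p rem 1 1 with
        | (rem', _, expSum) => sigmaAltLoop f k (p+1) rem' (total * expSum)
      else sigmaAltLoop f k (p+1) rem total
    else (rem, total)

def sigma_alt (n : Int) (k : Int) : Int :=
  if n = 0 then 0
  else
    let rt := sigmaAltLoop (n.toNat + 2) k 2 n 1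
    if rt.1 > 1 then rt.2 * (1 + rt.1 ^ k.toNat) else rt.2

-- ===== PRECONDITION & SPEC =====
-- Pre_ excludes n < 0, where A raises TypeError (int() of the complex value n**0.5), and k < 0
-- with n ≠ 0, where A returns a float instead of an int.
def Pre_sigma (n : Int) (k : Int) : Prop := 0 ≤ n ∧ (0 ≤ k ∨ n = 0)
instance (n : Int) (k : Int) : Decidable (Pre_sigma n k) := by unfold Pre_sigma; infer_instance
def pvWitness_sigma : Int × Int := (12, 2)

def Spec_sigma (n : Int) (k : Int) (out : Int) : Prop := out = sigma_alt n k
instance (n : Int) (k : Int) (out : Int) : Decidable (Spec_sigma n k out) := by unfold Spec_sigma; infer_instance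

-- ===== CLAIM (what is proved, stated in full; the proofs are below) =====
def Claim_equal_sigma : Prop := ∀ (n : Int) (k : Int), Dom_sigma n k → Pre_sigma n k → Spec_sigma n k (sigma n k)

-- ===== LEMMAS AND PROOFS =====

-- A sum over range X of 'if m % (j+1) = 0 then g (j+1)' is a sum of g over the divisors of m
-- that are ≤ X (shift the index by one and restrict to divisors).
lemma range_if_sum (m X : ℕ) (hX : X ≤ m) (g : ℕ → ℤ) :
    ∑ j ∈ Finset.range X, (if m % (j+1) = 0 then g (j+1) else 0)
      = ∑ d ∈ m.divisors.filter (fun d => d ≤ X), g d := by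
  rw [← Finset.sum_filter]
  refine Finset.sum_nbij' (i := fun j => j + 1) (j := fun d => d - 1) ?_ ?_ ?_ ?_ ?_
  · intro j hj
    simp only [Finset.mem_filter, Finset.mem_range, Nat.mem_divisors] at hj ⊢
    exact ⟨⟨Nat.dvd_of_mod_eq_zero hj.2, by omega⟩, by omega⟩
  · intro d hd
    simp only [Finset.mem_filter, Finset.mem_range, Nat.mem_divisors] at hd ⊢
    have hpos : 0 < d := Nat.pos_of_dvd_of_pos hd.1.1 (by omega)
    refine ⟨by omega, ?_⟩
    rw [Nat.sub_add_cancel hpos]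
    exact Nat.mod_eq_zero_of_dvd hd.1.1
  · intro j hj; show j + 1 - 1 = j; omega
  · intro d hd
    simp only [Finset.mem_filter, Nat.mem_divisors] at hd
    have hpos : 0 < d := Nat.pos_of_dvd_of_pos hd.1.1 (by omega)
    show d - 1 + 1 = d; omega
  · intro j hj; rfl

-- A's pairing invariant: summing g d plus (when d ≠ m/d) g (m/d) over the divisors d ≤ √m
-- covers every divisor of m exactly once (d ↦ m/d is a bijection small ↔ large divisors).
lemma pairing (m : ℕ) (g : ℕ → ℤ) :
    ∑ d ∈ m.divisors.filter (fun d => d ≤ Nat.sqrt m),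
        (g d + if d ≠ m / d then g (m / d) else 0)
      = ∑ d ∈ m.divisors, g d := by
  rcases Nat.eq_zero_or_pos m with hm | hm
  · subst hm; simp
  have hm0 : m ≠ 0 := by omega
  have hsq : m.divisors.filter (fun d => d ≤ Nat.sqrt m)
      = m.divisors.filter (fun d => d * d ≤ m) := by
    apply Finset.filter_congr; intro d _; simp [Nat.le_sqrt]
  rw [hsq, Finset.sum_add_distrib]
  have h2 : ∑ d ∈ m.divisors.filter (fun d => d * d ≤ m),
      (if d ≠ m / d then g (m / d) else 0)
      = ∑ d ∈ m.divisors.filter (fun d => d * d < m), g (m / d) := by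
    rw [← Finset.sum_filter, Finset.filter_filter]
    apply Finset.sum_congr _ (fun _ _ => rfl)
    apply Finset.filter_congr; intro d hd
    have hdvd : d ∣ m := (Nat.mem_divisors.mp hd).1
    have hpos : 0 < d := Nat.pos_of_dvd_of_pos hdvd hm
    have hmul : d * (m / d) = m := Nat.mul_div_cancel' hdvd
    simp only [ne_eq]
    constructor
    · rintro ⟨h1, hne⟩
      have : d * d ≠ m := by
        intro heq
        exact hne (by rw [← heq, Nat.mul_div_cancel_left d hpos])
      omega
    · intro hlt
      refine ⟨by omega, fun heq => ?_⟩
      rw [← heq] at hmul; nlinarith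
  rw [h2]
  have h3 : ∑ d ∈ m.divisors.filter (fun d => d * d < m), g (m / d)
      = ∑ e ∈ m.divisors.filter (fun e => ¬ e * e ≤ m), g e := by
    refine Finset.sum_nbij' (i := fun d => m / d) (j := fun e => m / e) ?_ ?_ ?_ ?_ ?_
    · intro d hd
      simp only [Finset.mem_filter, Nat.mem_divisors] at hd ⊢
      obtain ⟨⟨hdvd, _⟩, hlt⟩ := hd
      have hpos : 0 < d := Nat.pos_of_dvd_of_pos hdvd hm
      have hmul : d * (m / d) = m := Nat.mul_div_cancel' hdvd
      refine ⟨⟨Nat.div_dvd_of_dvd hdvd, hm0⟩, ?_⟩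
      have hdc : d < m / d := by nlinarith
      intro hle; nlinarith
    · intro e he
      simp only [Finset.mem_filter, Nat.mem_divisors] at he ⊢
      obtain ⟨⟨hdvd, _⟩, hgt⟩ := he
      have hgt' : m < e * e := by omega
      have hpos : 0 < e := Nat.pos_of_dvd_of_pos hdvd hm
      have hmul : e * (m / e) = m := Nat.mul_div_cancel' hdvd
      have hq : 0 < m / e := by
        rcases Nat.eq_zero_or_pos (m / e) with h | h
        · rw [h, Nat.mul_zero] at hmul; omega
        · exact h
      refine ⟨⟨Nat.div_dvd_of_dvd hdvd, hm0⟩, ?_⟩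
      have : m / e < e := by nlinarith
      nlinarith
    · intro d hd
      simp only [Finset.mem_filter, Nat.mem_divisors] at hd
      exact Nat.div_div_self hd.1.1 hm0
    · intro e he
      simp only [Finset.mem_filter, Nat.mem_divisors] at he
      exact Nat.div_div_self he.1.1 hm0
    · intro d hd; rfl
  rw [h3, Finset.sum_filter_add_sum_filter_not]

lemma inner_spec (k : Int) (p : ℕ) (hp : 2 ≤ p) (a : ℕ) :
    ∀ (s : ℕ), ¬ p ∣ s → 1 ≤ s → ∀ (fuel : ℕ), p ^ a * s ≤ fuel → ∀ (t sum : ℤ),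
    sigmaAltInner fuel k (p : ℤ) ((p ^ a * s : ℕ) : ℤ) t sum
      = ((s : ℤ), t * ((p : ℤ) ^ k.toNat) ^ a,
         sum + t * ∑ i ∈ Finset.range a, ((p : ℤ) ^ k.toNat) ^ (i + 1)) := by
  induction a with
  | zero =>
    intro s hs h1 fuel hf t sum
    have hmod : (p : ℤ) ∣ (s : ℤ) ↔ p ∣ s := Int.natCast_dvd_natCast
    match fuel with
    | 0 => simp [sigmaAltInner]
    | f+1 =>
      have h0 : ¬ PySem.Int.mod ((p ^ 0 * s : ℕ) : ℤ) (p : ℤ) = 0 := by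
        rw [PySem.Int.mod_eq_zero_iff_dvd]
        simp only [pow_zero, one_mul, hmod]
        exact hs
      simp only [sigmaAltInner, h0, if_false]
      simp
  | succ a ih =>
    intro s hs h1 fuel hf t sum
    have hps : 0 < p ^ (a+1) * s := by positivity
    match fuel with
    | 0 => omega
    | f+1 =>
      have hdvd : p ∣ p ^ (a+1) * s := Dvd.dvd.mul_right (dvd_pow_self p (by omega)) s
      have h0 : PySem.Int.mod ((p ^ (a+1) * s : ℕ) : ℤ) (p : ℤ) = 0 := by
        rw [PySem.Int.mod_eq_zero_iff_dvd]
        exact_mod_cast hdvd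
      have hdiv : PySem.Int.floordiv ((p ^ (a+1) * s : ℕ) : ℤ) (p : ℤ) = ((p ^ a * s : ℕ) : ℤ) := by
        rw [PySem.Int.floordiv_natCast]
        congr 1
        rw [pow_succ, mul_comm (p^a) p, mul_assoc]
        exact Nat.mul_div_cancel_left _ (by omega)
      have hle : p ^ a * s ≤ f := by
        have h2 : 2 * (p ^ a * s) ≤ p ^ (a+1) * s := by
          rw [pow_succ, mul_comm (p^a) p, mul_assoc]
          exact Nat.mul_le_mul_right _ (by omega)
        have : 0 < p ^ a * s := by positivity
        omega
      simp only [sigmaAltInner, h0, if_true]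
      rw [hdiv]
      rw [ih s hs h1 f hle (t * (p:ℤ) ^ k.toNat) (sum + t * (p:ℤ) ^ k.toNat)]
      simp only [Prod.mk.injEq]
      refine ⟨trivial, by ring, ?_⟩
      rw [Finset.sum_range_succ']
      simp only [pow_zero, pow_succ, Finset.mul_sum]
      have hc : ∀ i ∈ Finset.range a,
          t * ((p:ℤ)^k.toNat) * (((p:ℤ)^k.toNat)^i * (p:ℤ)^k.toNat)
            = t * (((p:ℤ)^k.toNat)^i * (p:ℤ)^k.toNat * (p:ℤ)^k.toNat) := fun i _ => by ring
      rw [Finset.sum_congr rfl hc, ← Finset.mul_sum]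
      ring

lemma sigma_nat_cast_sum (e r : ℕ) :
    ((ArithmeticFunction.sigma e r : ℕ) : ℤ) = ∑ d ∈ r.divisors, (d : ℤ) ^ e := by
  rw [ArithmeticFunction.sigma_apply]
  push_cast
  rfl

lemma prime_of_no_small_factor (p r : ℕ) (hr : 2 ≤ r)
    (hfac : ∀ q : ℕ, q.Prime → q ∣ r → p ≤ q) (hsq : r < p * p) : r.Prime := by
  by_contra hnp
  have hm : r.minFac.Prime := Nat.minFac_prime (by omega)
  have h1 : p ≤ r.minFac := hfac _ hm (Nat.minFac_dvd r)
  have h2 : r.minFac ^ 2 ≤ r := Nat.minFac_sq_le_self (by omega) hnp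
  have : p * p ≤ r.minFac * r.minFac := Nat.mul_le_mul h1 h1
  nlinarith [sq_nonneg r.minFac, h2, this, hsq]

lemma outer_spec (k : Int) : ∀ (fuel : ℕ), ∀ (p r : ℕ) (total : ℤ), 2 ≤ p → 1 ≤ r →
    (∀ q : ℕ, q.Prime → q ∣ r → p ≤ q) → r + 2 - p ≤ fuel →
    (if (sigmaAltLoop fuel k (p : ℤ) (r : ℤ) total).1 > 1 then
       (sigmaAltLoop fuel k (p : ℤ) (r : ℤ) total).2
         * (1 + (sigmaAltLoop fuel k (p : ℤ) (r : ℤ) total).1 ^ k.toNat)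
     else (sigmaAltLoop fuel k (p : ℤ) (r : ℤ) total).2)
      = total * ((ArithmeticFunction.sigma k.toNat r : ℕ) : ℤ) := by
  intro fuel
  induction fuel with
  | zero =>
    intro p r total hp hr hfac hm
    have hr1 : r = 1 := by
      by_contra h
      have hm2 : r.minFac.Prime := Nat.minFac_prime (by omega)
      have := hfac _ hm2 (Nat.minFac_dvd r)
      have := Nat.minFac_le (show 0 < r by omega)
      omega
    subst hr1
    simp [sigmaAltLoop]
  | succ f ih =>
    intro p r total hp hr hfac hm
    by_cases hsq : p * p ≤ r
    · have hsqZ : (p : ℤ) * (p : ℤ) ≤ (r : ℤ) := by exact_mod_cast hsq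
      by_cases hdvd : p ∣ r
      · have hprime : p.Prime := by
          by_contra hnp
          have hm2 : p.minFac.Prime := Nat.minFac_prime (by omega)
          have hlt : p.minFac < p := by
            have hne : p.minFac ≠ p := fun h => hnp (h ▸ hm2)
            have := Nat.minFac_le (show 0 < p by omega)
            omega
          exact absurd (hfac _ hm2 ((Nat.minFac_dvd p).trans hdvd)) (by omega)
        obtain ⟨a, s, hs, rfl⟩ := Nat.exists_eq_pow_mul_and_not_dvd
          (show r ≠ 0 by omega) p (by omega)
        have ha : 1 ≤ a := by
          by_contra h
          interval_cases a
          · simp at hdvd; exact hs hdvd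
        have hs1 : 1 ≤ s := by
          rcases Nat.eq_zero_or_pos s with h | h
          · subst h; simp at hr
          · exact h
        have hmodZ : PySem.Int.mod ((p ^ a * s : ℕ) : ℤ) (p : ℤ) = 0 := by
          rw [PySem.Int.mod_eq_zero_iff_dvd]; exact_mod_cast hdvd
        have htoNat : (((p ^ a * s : ℕ) : ℤ)).toNat = p ^ a * s := Int.toNat_natCast _
        have hsum : (1 : ℤ) + 1 * ∑ i ∈ Finset.range a, ((p:ℤ) ^ k.toNat) ^ (i + 1)
            = ((ArithmeticFunction.sigma k.toNat (p ^ a) : ℕ) : ℤ) := by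
          rw [ArithmeticFunction.sigma_apply_prime_pow hprime]
          push_cast
          rw [Finset.sum_range_succ']
          have : ∀ j, ((p:ℤ)) ^ (j * k.toNat) = ((p:ℤ) ^ k.toNat) ^ j := fun j => by
            rw [← pow_mul, mul_comm]
          simp only [this, pow_zero]
          ring
        have hfac' : ∀ q : ℕ, q.Prime → q ∣ s → p + 1 ≤ q := by
          intro q hq hqs
          have hq1 := hfac q hq (hqs.mul_left (p ^ a))
          rcases Nat.lt_or_ge p q with h | h
          · omega
          · have : q = p := by omega
            subst this; exact absurd hqs hs
        have hsr : 2 * s ≤ p ^ a * s := by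
          have h2 : 2 ≤ p ^ a := by
            calc 2 ≤ p := hp
            _ = p ^ 1 := (pow_one p).symm
            _ ≤ p ^ a := Nat.pow_le_pow_right (by omega) ha
          exact Nat.mul_le_mul_right _ h2
        have hih := ih (p+1) s (total * ((ArithmeticFunction.sigma k.toNat (p ^ a) : ℕ) : ℤ))
          (by omega) hs1 hfac' (by omega)
        push_cast at hih
        simp only [sigmaAltLoop, hsqZ, if_true, hmodZ, htoNat]
        rw [inner_spec k p hp a s hs hs1 (p ^ a * s) le_rfl 1 1]
        dsimp only
        rw [hsum, hih]
        have hcop : Nat.Coprime (p ^ a) s :=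
          Nat.Coprime.pow_left a ((Nat.Prime.coprime_iff_not_dvd hprime).mpr hs)
        rw [ArithmeticFunction.isMultiplicative_sigma.map_mul_of_coprime hcop]
        push_cast
        ring
      · have hmodZ : ¬ PySem.Int.mod ((r : ℕ) : ℤ) (p : ℤ) = 0 := by
          rw [PySem.Int.mod_eq_zero_iff_dvd]
          exact fun h => hdvd (by exact_mod_cast h)
        have hfac' : ∀ q : ℕ, q.Prime → q ∣ r → p + 1 ≤ q := by
          intro q hq hqr
          have := hfac q hq hqr
          rcases Nat.lt_or_ge p q with h | h
          · omega
          · have : q = p := by omega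
            subst this; exact absurd hqr hdvd
        have hih := ih (p+1) r total (by omega) hr hfac' (by omega)
        push_cast at hih
        simp only [sigmaAltLoop, hsqZ, if_true, hmodZ, if_false]
        exact hih
    · have hsqZ : ¬ ((p : ℤ) * (p : ℤ) ≤ (r : ℤ)) := fun h => hsq (by exact_mod_cast h)
      simp only [sigmaAltLoop, hsqZ, if_false]
      rcases Nat.lt_or_ge r 2 with h2 | h2
      · have : r = 1 := by omega
        subst this
        simp
      · have hprime : r.Prime := prime_of_no_small_factor p r h2 hfac (by omega)
        have hgt : ((r : ℕ) : ℤ) > 1 := by exact_mod_cast h2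
        simp only [hgt, if_true]
        rw [ArithmeticFunction.sigma_apply, Nat.Prime.divisors hprime]
        rw [Finset.sum_pair (by omega : (1:ℕ) ≠ r)]
        push_cast
        ring

-- A, for n = m ≥ 0, computes the divisor-power sum: its √m loop with the pairing term covers
-- every divisor exactly once (range_if_sum + pairing).
theorem sigma_eq_divisors (n k : Int) (h0 : 0 ≤ n) :
    sigma n k = ∑ d ∈ n.toNat.divisors, (d : ℤ) ^ k.toNat := by
  obtain ⟨m, rfl⟩ : ∃ m : ℕ, n = (m : ℤ) := ⟨n.toNat, (Int.toNat_of_nonneg h0).symm⟩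
  have hA : sigma (m : ℤ) k
      = ∑ j ∈ Finset.range (Nat.sqrt m),
          (if m % (j+1) = 0 then
            (((j+1 : ℕ) : ℤ) ^ k.toNat + if (j+1) ≠ m / (j+1) then ((m / (j+1) : ℕ) : ℤ) ^ k.toNat else 0)
           else 0) := by
    unfold sigma
    have hstep : (fun (total d : ℤ) =>
        if PySem.Int.mod (m : ℤ) d = 0 then
          let t := total + d ^ k.toNat
          if d ≠ PySem.Int.floordiv (m : ℤ) d then t + (PySem.Int.floordiv (m : ℤ) d) ^ k.toNat else t
        else total)
        = fun total d => total + (if PySem.Int.mod (m : ℤ) d = 0 then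
            (d ^ k.toNat + if d ≠ PySem.Int.floordiv (m : ℤ) d then (PySem.Int.floordiv (m : ℤ) d) ^ k.toNat else 0)
          else 0) := by
      funext t d; split_ifs <;> (try simp) <;> ring
    rw [hstep, PySem.List.foldl_add, PySem.List.pyRange_one, List.map_map]
    have hlen : ((Nat.sqrt ((m : ℤ)).toNat : ℤ) + 1 - 1).toNat = Nat.sqrt m := by
      simp
    rw [hlen]
    show (0 : ℤ) + ∑ j ∈ Finset.range (Nat.sqrt m), _ = _
    rw [zero_add]
    apply Finset.sum_congr rfl
    intro j _
    have hcast : (1 : ℤ) + (j : ℤ) = ((j + 1 : ℕ) : ℤ) := by push_cast; ring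
    simp only [Function.comp, hcast, PySem.Int.mod_natCast, PySem.Int.floordiv_natCast,
      Nat.cast_eq_zero, ne_eq, Nat.cast_inj]
  have h2 : (∑ j ∈ Finset.range (Nat.sqrt m),
        (if m % (j+1) = 0 then
          (((j+1 : ℕ) : ℤ) ^ k.toNat + if (j+1) ≠ m / (j+1) then ((m / (j+1) : ℕ) : ℤ) ^ k.toNat else 0)
         else 0))
      = ∑ d ∈ m.divisors.filter (fun d => d ≤ Nat.sqrt m),
          (((d : ℕ) : ℤ) ^ k.toNat + if d ≠ m / d then ((m / d : ℕ) : ℤ) ^ k.toNat else 0) :=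
    range_if_sum m (Nat.sqrt m) (Nat.sqrt_le_self m)
      (fun d => ((d : ℕ) : ℤ) ^ k.toNat + if d ≠ m / d then ((m / d : ℕ) : ℤ) ^ k.toNat else 0)
  rw [hA, h2, pairing, Int.toNat_natCast]

-- B computes the same divisor-power sum through the prime factorisation (outer_spec).
theorem sigma_alt_eq_divisors (n k : Int) (h0 : 0 ≤ n) :
    sigma_alt n k = ∑ d ∈ n.toNat.divisors, (d : ℤ) ^ k.toNat := by
  obtain ⟨m, rfl⟩ : ∃ m : ℕ, n = (m : ℤ) := ⟨n.toNat, (Int.toNat_of_nonneg h0).symm⟩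
  rw [Int.toNat_natCast]
  rcases Nat.eq_zero_or_pos m with hm | hm
  · subst hm
    simp [sigma_alt]
  · have hne : ((m : ℕ) : ℤ) ≠ 0 := by exact_mod_cast (by omega : m ≠ 0)
    have h2 : ((2 : ℕ) : ℤ) = (2 : ℤ) := by norm_num
    have hout := outer_spec k (m + 2) 2 m 1 le_rfl hm
      (fun q hq _ => hq.two_le) (by omega)
    rw [h2] at hout
    unfold sigma_alt
    rw [if_neg hne]
    show (let rt := sigmaAltLoop (((m : ℕ) : ℤ).toNat + 2) k 2 ((m : ℕ) : ℤ) 1;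
      if rt.1 > 1 then rt.2 * (1 + rt.1 ^ k.toNat) else rt.2) = _
    rw [Int.toNat_natCast]
    rw [show (let rt := sigmaAltLoop (m + 2) k 2 ((m : ℕ) : ℤ) 1;
      if rt.1 > 1 then rt.2 * (1 + rt.1 ^ k.toNat) else rt.2) = _ from hout]
    rw [one_mul, sigma_nat_cast_sum]

-- ===== VERDICT (by name: the statement is the Claim_ definition above) =====
theorem sigma_spec : Claim_equal_sigma := by
  intro n k _ hp
  unfold Pre_sigma at hp
  unfold Spec_sigma
  rw [sigma_eq_divisors n k hp.1, sigma_alt_eq_divisors n k hp.1]
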